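-- pv_equiv track=rewrite | github.com/lchaloupsky/Medical-Reports-Generator | preprocessors/time_preprocessor.py | _get_digits_range
-- ===== SOURCE A (Python) =====
-- def _get_digits_range(text: str, start: int, end: int):
--     digits_start, digits_end = start, None
--     for i in range(start - 1, -1, -1):
--         if str.isspace(text[i]) or text[i] == ":":
--             continue
--         elif str.isdigit(text[i]):
--             digits_start = i
--             digits_end = i if digits_end == None else digits_end
--         else:
--             break
--
--     return digits_start, digits_end
-- ===== SOURCE B (Python) =====
-- def _get_digits_range(text: str, start: int, end: int):
--     # Phase 1: find the left boundary of the maximal run of digit/space/':' chars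
--     # ending just before `start`.
--     lo = start
--     for i in range(start - 1, -1, -1):
--         if text[i].isdigit() or text[i].isspace() or text[i] == ":":
--             lo = i
--         else:
--             break
--     # Phase 2: collect digit positions in [lo, start) left to right.
--     digits = [j for j in range(lo, start) if text[j].isdigit()]
--     if digits:
--         return digits[0], digits[-1]
--     return start, None
-- ===== Notes on version B (the rewrite author's own statement) =====
-- stated objective: alternative
-- what changed: A's single backward scan threading (digits_start, digits_end) state is replaced by two stateless passes: a backward scan that only finds the left boundary of the digit/whitespace/':' run, then a forward comprehension collecting digit positions whose first and last elements give the result.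
import Mathlib
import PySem

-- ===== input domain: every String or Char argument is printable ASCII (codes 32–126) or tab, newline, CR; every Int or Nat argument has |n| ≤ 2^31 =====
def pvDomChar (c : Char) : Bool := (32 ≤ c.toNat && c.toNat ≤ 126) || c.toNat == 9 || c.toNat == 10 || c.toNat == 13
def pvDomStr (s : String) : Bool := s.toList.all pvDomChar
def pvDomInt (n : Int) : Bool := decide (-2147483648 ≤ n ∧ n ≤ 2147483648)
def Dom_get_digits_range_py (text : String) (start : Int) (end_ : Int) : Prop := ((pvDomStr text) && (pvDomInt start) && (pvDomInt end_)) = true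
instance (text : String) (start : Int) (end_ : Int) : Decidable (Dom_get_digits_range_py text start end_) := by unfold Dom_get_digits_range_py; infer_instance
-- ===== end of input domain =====

-- B replaces A's single stateful backward scan by a boundary-finding backward pass
-- followed by a forward digit-collecting pass (objective: alternative decomposition).

-- ===== PORT A =====
-- one iteration of A's loop body at index i: `none` means the loop stops here
-- (Python's `break`, or the IndexError excluded by Pre_), `some st'` means `continue` with state st'
def pvAStep (cs : List Char) (i : Nat) (st : Int × Option Int) : Option (Int × Option Int) :=
  match cs[i]? with
  | none => none   -- IndexError in Python; excluded by Pre_get_digits_range_py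
  | some c =>
    if PySem.Chars.isspace c || c == ':' then some st
    else if PySem.Chars.isdigit c then
      some ((i : Int), if st.2 = none then some (i : Int) else st.2)
    else none      -- break

-- A's `for i in range(start-1, -1, -1)` loop, counting i down from the given index to 0
def pvAScan (cs : List Char) : Nat → (Int × Option Int) → Int × Option Int
  | 0, st => (pvAStep cs 0 st).getD st
  | j+1, st =>
    match pvAStep cs (j+1) st with
    | none => st
    | some st' => pvAScan cs j st'

def get_digits_range_py (text : String) (start : Int) (end_ : Int) : Int × Option Int :=
  if start - 1 < 0 then (start, none)   -- empty range(start-1, -1, -1)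
  else pvAScan text.toList (start - 1).toNat (start, none)

-- ===== PORT B =====
-- Source B's phase-1 continue test at index i (digit, whitespace or ':')
def pvBOkAt (cs : List Char) (i : Nat) : Bool :=
  match cs[i]? with
  | none => false  -- IndexError in Python; excluded by Pre_get_digits_range_py
  | some c => PySem.Chars.isdigit c || PySem.Chars.isspace c || c == ':'

-- Source B's phase-1 backward loop from the given index down to 0; returns the final lo
-- (at index i the running lo is i+1, so stopping returns i+1)
def pvBLo (cs : List Char) : Nat → Int
  | 0 => if pvBOkAt cs 0 then 0 else 1
  | j+1 => if pvBOkAt cs (j+1) then pvBLo cs j else (j : Int) + 2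

-- Source B's phase-2 digit test text[j].isdigit() (j is nonnegative wherever phase 2 runs)
def pvDigAt (cs : List Char) (j : Int) : Bool :=
  ((cs[j.toNat]?).map PySem.Chars.isdigit).getD false

def get_digits_range_py_alt (text : String) (start : Int) (end_ : Int) : Int × Option Int :=
  let cs := text.toList
  let lo : Int := if start - 1 < 0 then start else pvBLo cs (start - 1).toNat
  let digits := (PySem.List.pyRange lo start 1).filter (pvDigAt cs)
  match digits with
  | [] => (start, none)
  | d :: rest => (d, (d :: rest).getLast?)

-- ===== PRECONDITION & SPEC =====
-- Pre_ excludes exactly start > len(text), where A's text[start-1] raises IndexError (B raises there too).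
def Pre_get_digits_range_py (text : String) (start : Int) (end_ : Int) : Prop :=
  start ≤ (text.toList.length : Int)
instance (text : String) (start : Int) (end_ : Int) : Decidable (Pre_get_digits_range_py text start end_) := by unfold Pre_get_digits_range_py; infer_instance

def pvWitness_get_digits_range_py : String × Int × Int := ("ab 12: ", 7, 0)

def Spec_get_digits_range_py (text : String) (start : Int) (end_ : Int) (out : Int × Option Int) : Prop := out = get_digits_range_py_alt text start end_
instance (text : String) (start : Int) (end_ : Int) (out : Int × Option Int) : Decidable (Spec_get_digits_range_py text start end_ out) := by unfold Spec_get_digits_range_py; infer_instance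

-- ===== CLAIM (what is proved, stated in full; the proofs are below) =====
def Claim_equal_get_digits_range_py : Prop := ∀ (text : String) (start : Int) (end_ : Int), Dom_get_digits_range_py text start end_ → Pre_get_digits_range_py text start end_ → Spec_get_digits_range_py text start end_ (get_digits_range_py text start end_)

-- ===== LEMMAS AND PROOFS =====

-- a whitespace character is not a digit (Python's isspace/isdigit are disjoint)
theorem pv_space_not_digit (c : Char) (h : PySem.Chars.isspace c = true) : PySem.Chars.isdigit c = false := by
  have h0 : '0'.val.toNat = 48 := rfl
  have h9 : '9'.val.toNat = 57 := rfl
  simp only [PySem.Chars.isspace, PySem.Chars.isdigit] at *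
  simp only [Char.le_def, Char.toNat, UInt32.le_iff_toNat_le, decide_eq_true_eq, Bool.or_eq_true,
    Bool.and_eq_true, Bool.eq_false_iff, ne_eq, not_and, not_le] at *
  omega

theorem pvBLo_bounds (cs : List Char) (i : Nat) : 0 ≤ pvBLo cs i ∧ pvBLo cs i ≤ (i : Int) + 1 := by
  induction i with
  | zero => simp only [pvBLo]; split <;> simp
  | succ j ih => simp only [pvBLo]; split <;> [omega; push_cast] <;> omega

-- the digits collected by B in [pvBLo cs i, i+1), in increasing order
def pvDigs (cs : List Char) (i : Nat) : List Int :=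
  (PySem.List.pyRange (pvBLo cs i) ((i : Nat) + 1) 1).filter (pvDigAt cs)

theorem pvDigAt_natCast (cs : List Char) (k : Nat) (c : Char) (hc : cs[k]? = some c) :
    pvDigAt cs (k : Int) = PySem.Chars.isdigit c := by
  simp [pvDigAt, hc]

theorem pvDigs_zero (cs : List Char) (c : Char) (hc : cs[0]? = some c) :
    pvDigs cs 0 = if PySem.Chars.isdigit c || PySem.Chars.isspace c || c == ':' then
        (if PySem.Chars.isdigit c then [(0 : Int)] else []) else [] := by
  have hd : pvDigAt cs (0 : Int) = PySem.Chars.isdigit c := pvDigAt_natCast cs 0 c hc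
  simp only [pvDigs, pvBLo, pvBOkAt, hc]
  split
  · have h1 : PySem.List.pyRange 0 1 1 = [(0 : Int)] := by decide
    cases hdd : PySem.Chars.isdigit c <;> simp [h1, List.filter, hd, hdd]
  · have h0 : PySem.List.pyRange 1 1 1 = [] := PySem.List.pyRange_one_eq_nil le_rfl
    simp [h0]

theorem pvDigs_succ (cs : List Char) (j : Nat) (c : Char) (hc : cs[j+1]? = some c) :
    pvDigs cs (j+1) = if PySem.Chars.isdigit c || PySem.Chars.isspace c || c == ':' then
        pvDigs cs j ++ (if PySem.Chars.isdigit c then [((j : Int) + 1)] else []) else [] := by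
  have hd : pvDigAt cs ((j : Int) + 1) = PySem.Chars.isdigit c := by
    have := pvDigAt_natCast cs (j+1) c hc
    push_cast at this
    exact this
  have hcast : (((j + 1 : Nat) : Int)) + 1 = (j : Int) + 2 := by push_cast; ring
  simp only [pvDigs, pvBLo, pvBOkAt, hc, hcast]
  split
  · have hb := pvBLo_bounds cs j
    have hsplit := PySem.List.pyRange_one_append (pvBLo cs j) ((j : Int) + 1) ((j : Int) + 2)
      (by omega) (by omega)
    have hone : PySem.List.pyRange ((j : Int) + 1) ((j : Int) + 2) 1 = [((j : Int) + 1)] := by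
      rw [show (j : Int) + 2 = ((j : Int) + 1) + 1 by ring]
      exact PySem.List.pyRange_one_singleton _
    rw [hsplit, List.filter_append, hone]
    cases hdd : PySem.Chars.isdigit c <;> simp [List.filter, hd, hdd]
  · have h0 : PySem.List.pyRange ((j : Int) + 2) ((j : Int) + 2) 1 = [] :=
      PySem.List.pyRange_one_eq_nil le_rfl
    simp [h0]

theorem pvMain (cs : List Char) (i : Nat) (hi : i < cs.length) (ds : Int) (de : Option Int) :
    pvAScan cs i (ds, de) =
      match pvDigs cs i with
      | [] => (ds, de)
      | d :: rest => (d, if de = none then (d :: rest).getLast? else de) := by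
  induction i generalizing ds de with
  | zero =>
    obtain ⟨c, hc⟩ : ∃ c, cs[0]? = some c := ⟨cs[0], List.getElem?_eq_getElem hi⟩
    rw [pvDigs_zero cs c hc]
    simp only [pvAScan, pvAStep, hc]
    by_cases hsp : (PySem.Chars.isspace c || c == ':') = true
    · have hnd : PySem.Chars.isdigit c = false := by
        rcases Bool.or_eq_true_iff.mp hsp with h | h
        · exact pv_space_not_digit c h
        · have : c = ':' := by simpa using h
          subst this; decide
      rw [if_pos hsp]
      simp [hsp, hnd]
    · rw [if_neg hsp]
      by_cases hdg : PySem.Chars.isdigit c = true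
      · rw [if_pos hdg]
        simp only [Bool.not_eq_true] at hsp
        simp [hdg]
      · simp only [Bool.not_eq_true] at hdg hsp
        rw [if_neg (by simp [hdg])]
        simp [hdg, hsp]
  | succ j ih =>
    have hj : j < cs.length := Nat.lt_of_succ_lt hi
    obtain ⟨c, hc⟩ : ∃ c, cs[j+1]? = some c := ⟨cs[j+1], List.getElem?_eq_getElem hi⟩
    rw [pvDigs_succ cs j c hc]
    simp only [pvAScan, pvAStep, hc]
    by_cases hsp : (PySem.Chars.isspace c || c == ':') = true
    · have hnd : PySem.Chars.isdigit c = false := by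
        rcases Bool.or_eq_true_iff.mp hsp with h | h
        · exact pv_space_not_digit c h
        · have : c = ':' := by simpa using h
          subst this; decide
      rw [if_pos hsp]
      have hok : (PySem.Chars.isdigit c || PySem.Chars.isspace c || c == ':') = true := by
        rcases Bool.or_eq_true_iff.mp hsp with h | h <;> simp [h]
      rw [if_pos hok, if_neg (by simp [hnd])]
      simp only [List.append_nil]
      exact ih hj ds de
    · rw [if_neg hsp]
      by_cases hdg : PySem.Chars.isdigit c = true
      · rw [if_pos hdg]
        have hok : (PySem.Chars.isdigit c || PySem.Chars.isspace c || c == ':') = true := by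
          simp [hdg]
        rw [if_pos hok, if_pos hdg]
        have hcast : (((j + 1 : Nat)) : Int) = (j : Int) + 1 := by push_cast; ring
        refine (ih hj (((j + 1 : Nat)) : Int) (if de = none then some (((j + 1 : Nat)) : Int) else de)).trans ?_
        simp only [hcast]
        cases de with
        | none =>
          cases hD : pvDigs cs j with
          | nil => simp
          | cons d rest =>
            simp
            rw [show (d :: (rest ++ [(j : Int) + 1])) = (d :: rest) ++ [(j : Int) + 1] from rfl,
              List.getLast?_concat]
        | some x =>
          cases hD : pvDigs cs j with
          | nil => simp
          | cons d rest => simp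
      · simp only [Bool.not_eq_true] at hdg hsp
        simp [hdg, hsp]

-- ===== VERDICT (by name: the statement is the Claim_ definition above) =====
theorem get_digits_range_py_spec : Claim_equal_get_digits_range_py := by
  intro text start end_ hD hP
  unfold Pre_get_digits_range_py at hP
  unfold Spec_get_digits_range_py get_digits_range_py get_digits_range_py_alt
  by_cases hlt : start - 1 < 0
  · have h0 : PySem.List.pyRange start start 1 = [] := PySem.List.pyRange_one_eq_nil le_rfl
    simp [hlt, h0]
  · set cs := text.toList with hcs
    set n := (start - 1).toNat with hn
    have hnn : ((n : Int)) = start - 1 := by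
      rw [hn]; exact Int.toNat_of_nonneg (by omega)
    have hstart : start = (n : Int) + 1 := by omega
    have hlen : n < cs.length := by
      have : (n : Int) < (cs.length : Int) := by omega
      exact_mod_cast this
    simp only [hlt, if_false, pvMain cs n hlen start none]
    have hrange : PySem.List.pyRange (pvBLo cs n) start 1
        = PySem.List.pyRange (pvBLo cs n) (((n : Nat) : Int) + 1) 1 := by rw [← hstart]
    simp only [pvDigs] at *
    rw [hrange]
    cases hD2 : (PySem.List.pyRange (pvBLo cs n) (((n : Nat) : Int) + 1) 1).filter (pvDigAt cs) with
    | nil => simp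
    | cons d rest => simp
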